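-- pv_equiv track=rewrite | github.com/ShivaSubramanyam02/DataStructures-and-Algorithms | Recursion/recursion-2/problem4.py | can_reach_one
-- ===== SOURCE A (Python) =====
-- def can_reach_one(n):
--     while n > 1:
--         if n % 10 == 0:
--             n //= 10
--         elif n % 20 == 0:
--             n //= 20
--         else:
--             return False
--     return n == 1
-- ===== SOURCE B (Python) =====
-- def can_reach_one(n):
--     p = 1
--     while p < n:
--         p *= 10
--     return p == n and n >= 1
-- ===== Notes on version B (the rewrite author's own statement) =====
-- stated objective: simpler
-- what changed: Instead of A's branching loop that divides n down, B multiplies a single power of ten upward until it reaches n and compares once (A's second division branch is unreachable).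
import Mathlib
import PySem

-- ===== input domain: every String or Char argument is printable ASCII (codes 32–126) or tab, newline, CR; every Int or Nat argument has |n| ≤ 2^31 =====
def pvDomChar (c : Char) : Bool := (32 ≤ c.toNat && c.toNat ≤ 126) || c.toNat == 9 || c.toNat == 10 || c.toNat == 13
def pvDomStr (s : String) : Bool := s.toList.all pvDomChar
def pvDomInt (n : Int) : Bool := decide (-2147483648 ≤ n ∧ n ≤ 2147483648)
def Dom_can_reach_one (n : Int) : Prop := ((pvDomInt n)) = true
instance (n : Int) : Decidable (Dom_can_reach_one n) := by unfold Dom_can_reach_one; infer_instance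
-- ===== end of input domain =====

-- B replaces A's divide-down loop (whose second branch is unreachable) by growing one power of ten upward and comparing once; objective: simpler.

-- ===== PORT A =====
def can_reach_one (n : Int) : Bool :=
  if n > 1 then
    if PySem.Int.mod n 10 == 0 then can_reach_one (PySem.Int.floordiv n 10)
    else if PySem.Int.mod n 20 == 0 then can_reach_one (PySem.Int.floordiv n 20)
    else false
  else n == 1
termination_by n.toNat
decreasing_by
  · rw [PySem.Int.floordiv_eq_ediv_of_pos (by omega)]; omega
  · rw [PySem.Int.floordiv_eq_ediv_of_pos (by omega)]; omega

-- ===== PORT B =====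
def pvGrow (n p : Int) (hp : 0 < p) : Bool :=
  if p < n then pvGrow n (p * 10) (by omega)
  else p == n && decide (n ≥ 1)
termination_by (n - p).toNat
decreasing_by omega

def can_reach_one_alt (n : Int) : Bool := pvGrow n 1 (by omega)

-- ===== PRECONDITION & SPEC =====
def Spec_can_reach_one (n : Int) (out : Bool) : Prop := out = can_reach_one_alt n
instance (n : Int) (out : Bool) : Decidable (Spec_can_reach_one n out) := by unfold Spec_can_reach_one; infer_instance

-- ===== CLAIM (what is proved, stated in full; the proofs are below) =====
def Claim_equal_can_reach_one : Prop := ∀ (n : Int), Dom_can_reach_one n → Spec_can_reach_one n (can_reach_one n)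

-- ===== LEMMAS AND PROOFS =====

-- A returns true exactly on the powers of ten.
theorem can_reach_one_char (n : Int) : can_reach_one n = true ↔ ∃ k : ℕ, n = 10 ^ k := by
  induction n using can_reach_one.induct with
  | case1 n h1 h2 ih =>
      rw [can_reach_one, if_pos h1, if_pos h2, ih]
      have h2' : PySem.Int.mod n 10 = 0 := by simpa using h2
      rw [PySem.Int.mod_eq_zero_iff_dvd] at h2'
      rw [PySem.Int.floordiv_eq_ediv_of_pos (by omega)]
      constructor
      · rintro ⟨k, hk⟩
        exact ⟨k + 1, by rw [pow_succ]; omega⟩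
      · rintro ⟨k, hk⟩
        match k with
        | 0 => omega
        | k + 1 =>
            refine ⟨k, ?_⟩
            rw [pow_succ] at hk; omega
  | case2 n h1 h2 h3 ih =>
      exfalso
      have h2' : ¬ PySem.Int.mod n 10 = 0 := by simpa using h2
      have h3' : PySem.Int.mod n 20 = 0 := by simpa using h3
      rw [PySem.Int.mod_eq_zero_iff_dvd] at h3'
      rw [PySem.Int.mod_eq_zero_iff_dvd] at h2'
      omega
  | case3 n h1 h2 h3 =>
      rw [can_reach_one, if_pos h1, if_neg h2, if_neg h3]
      constructor
      · intro h; cases h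
      · rintro ⟨k, hk⟩
        have h2' : ¬ PySem.Int.mod n 10 = 0 := by simpa using h2
        rw [PySem.Int.mod_eq_zero_iff_dvd] at h2'
        match k with
        | 0 => omega
        | k + 1 =>
            rw [pow_succ] at hk
            exact absurd ⟨10 ^ k, by omega⟩ h2'
  | case4 n h1 =>
      rw [can_reach_one, if_neg h1]
      constructor
      · intro h; exact ⟨0, by simp at h; omega⟩
      · rintro ⟨k, hk⟩
        match k with
        | 0 => simp at hk ⊢; omega
        | k + 1 =>
            exfalso
            have : (1:Int) ≤ 10 ^ k := one_le_pow₀ (by norm_num)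
            rw [pow_succ] at hk; omega

-- B's loop returns true exactly when n is p times a power of ten (and positive).
theorem pvGrow_char (n p : Int) (hp : 0 < p) :
    pvGrow n p hp = true ↔ 1 ≤ n ∧ ∃ k : ℕ, n = p * 10 ^ k := by
  induction p, hp using pvGrow.induct (n := n) with
  | case1 p hp h ih =>
      rw [pvGrow, if_pos h, ih]
      constructor
      · rintro ⟨hn, k, hk⟩
        exact ⟨hn, k + 1, by rw [pow_succ]; ring_nf; ring_nf at hk; omega⟩
      · rintro ⟨hn, k, hk⟩
        refine ⟨hn, ?_⟩
        match k with
        | 0 => omega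
        | k + 1 =>
            refine ⟨k, ?_⟩
            rw [pow_succ] at hk; ring_nf; ring_nf at hk; omega
  | case2 p hp h =>
      rw [pvGrow, if_neg h]
      simp only [Bool.and_eq_true, beq_iff_eq, decide_eq_true_eq]
      constructor
      · rintro ⟨rfl, hn⟩; exact ⟨hn, 0, by ring⟩
      · rintro ⟨hn, k, hk⟩
        have hpow : (1:Int) ≤ 10 ^ k := one_le_pow₀ (by norm_num)
        have : p ≤ p * 10 ^ k := le_mul_of_one_le_right (by omega) hpow
        constructor <;> omega

theorem can_reach_one_alt_char (n : Int) :
    can_reach_one_alt n = true ↔ 1 ≤ n ∧ ∃ k : ℕ, n = 10 ^ k := by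
  rw [can_reach_one_alt, pvGrow_char]
  simp

-- ===== VERDICT (by name: the statement is the Claim_ definition above) =====
theorem can_reach_one_spec : Claim_equal_can_reach_one := by
  intro n _
  unfold Spec_can_reach_one
  have hA := can_reach_one_char n
  have hB := can_reach_one_alt_char n
  have hpos : (∃ k : ℕ, n = 10 ^ k) → 1 ≤ n := by
    rintro ⟨k, rfl⟩; exact one_le_pow₀ (by norm_num)
  cases h1 : can_reach_one n <;> cases h2 : can_reach_one_alt n <;> simp_all
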